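-- pv_equiv track=rewrite | github.com/ajy9844/coding-interview | programmers/92344.py | solution
-- ===== SOURCE A (Python) =====
-- def solution(board, skill):
--     answer = 0
--     n, m = len(board), len(board[0])
--     map = [[0 for _ in range(m)] for _ in range(n)]
--
--     for type, r1, c1, r2, c2, degree in skill:
--         if type == 1:
--             degree = -degree
--         map[r1][c1] += degree
--         if r2+1 < n:
--             map[r2+1][c1] += -degree
--         if c2+1 < m:
--             map[r1][c2+1] += -degree
--         if r2+1 < n and c2+1 < m:
--             map[r2+1][c2+1] += degree
--
--     for r in range(n):
--         for c in range(m-1):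
--             map[r][c+1] += map[r][c]
--
--     for r in range(n-1):
--         for c in range(m):
--             map[r+1][c] += map[r][c]
--
--     for r in range(n):
--         for c in range(m):
--             board[r][c] += map[r][c]
--             if board[r][c] >= 1:
--                 answer += 1
--
--     return answer
-- ===== SOURCE B (Python) =====
-- # B: direct rectangle updates instead of a difference array with two prefix-sum sweeps.
-- # Mutates `board` in place exactly like A does (on the stated precondition the final
-- # board contents coincide with A's); the proved equivalence is about the return value.
-- def solution(board, skill):
--     n, m = len(board), len(board[0])
--     for t, r1, c1, r2, c2, degree in skill:
--         if t == 1: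
--             degree = -degree
--         for r in range(r1, r2 + 1):
--             for c in range(c1, c2 + 1):
--                 board[r][c] += degree
--     answer = 0
--     for r in range(n):
--         for c in range(m):
--             if board[r][c] >= 1:
--                 answer += 1
--     return answer
-- ===== Notes on version B (the rewrite author's own statement) =====
-- stated objective: simpler
-- what changed: Replaces A's difference-array corner deltas plus horizontal and vertical prefix-sum sweeps by directly adding the (sign-adjusted) degree to every cell of each skill's rectangle, followed by the same final counting loop.
-- outside the precondition, e.g. on solution([[0]], [[0, 0, 0, 5, 0, 1]]): A returns 1, B raises IndexError; on solution([[1], [1], [1]], [[0, 2, 0, 0, 0, 1]]): A returns 2, B returns 3; on solution([[1], [1]], [[0, -1, 0, -1, 0, 5]]): A returns 1, B returns 2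
import Mathlib
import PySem

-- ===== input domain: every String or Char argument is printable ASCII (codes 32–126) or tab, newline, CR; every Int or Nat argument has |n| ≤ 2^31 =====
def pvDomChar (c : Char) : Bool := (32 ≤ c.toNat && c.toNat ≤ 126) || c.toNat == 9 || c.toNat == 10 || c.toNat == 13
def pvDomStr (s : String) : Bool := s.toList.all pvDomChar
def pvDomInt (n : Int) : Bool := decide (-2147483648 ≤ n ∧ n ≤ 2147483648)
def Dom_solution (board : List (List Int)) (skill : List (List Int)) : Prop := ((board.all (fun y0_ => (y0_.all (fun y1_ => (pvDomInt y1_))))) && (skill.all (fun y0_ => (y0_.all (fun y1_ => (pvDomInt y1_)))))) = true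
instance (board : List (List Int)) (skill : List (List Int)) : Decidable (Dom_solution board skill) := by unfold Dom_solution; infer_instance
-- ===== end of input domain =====

-- B replaces A's difference-array + two prefix-sum sweeps by direct rectangle updates
-- (objective: simpler).  Both Pythons mutate `board` in place (identically on Pre_);
-- the equivalence proved here is about the RETURN value.

-- ===== PORT A =====
-- shared indexing primitives (Python list indexing / in-place `+=` on a 2-D list)
-- pvGet g i j = g[i][j] for in-range Nat indices (default 0 out of range, unreachable under Pre_)
def pvGet (g : List (List Int)) (i j : Nat) : Int := (g.getD i []).getD j 0
-- pvAdd g i j d = `g[i][j] += d` (no-op out of range; Python would raise there — outside Pre_)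
def pvAdd (g : List (List Int)) (i j : Nat) (d : Int) : List (List Int) :=
  g.modify i (fun row => row.modify j (fun x => x + d))
-- Python index semantics: negative index wraps by `len`; still-out-of-range raises (outside Pre_)
def iIdx (len : Nat) (i : Int) : Nat := (if i < 0 then i + (len : Int) else i).toNat

-- one iteration of A's skill loop (corner deltas of the difference array)
def applySkillA (n m : Nat) (g : List (List Int)) (s : List Int) : List (List Int) :=
  match s with
  | [t, r1, c1, r2, c2, deg0] =>
    let degree := if t = 1 then -deg0 else deg0
    let g1 := pvAdd g (iIdx n r1) (iIdx m c1) degree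
    let g2 := if r2 + 1 < (n : Int) then pvAdd g1 (iIdx n (r2+1)) (iIdx m c1) (-degree) else g1
    let g3 := if c2 + 1 < (m : Int) then pvAdd g2 (iIdx n r1) (iIdx m (c2+1)) (-degree) else g2
    if r2 + 1 < (n : Int) ∧ c2 + 1 < (m : Int) then pvAdd g3 (iIdx n (r2+1)) (iIdx m (c2+1)) degree else g3
  | _ => g   -- Python raises ValueError on unpacking; outside Pre_

-- `for r in range(n): for c in range(m-1): map[r][c+1] += map[r][c]`
def hinner (r t : Nat) (g : List (List Int)) : List (List Int) :=
  (List.range t).foldl (fun g c => pvAdd g r (c+1) (pvGet g r c)) g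
def hpass (n m : Nat) (g : List (List Int)) : List (List Int) :=
  (List.range n).foldl (fun g r => hinner r (m-1) g) g
-- `for r in range(n-1): for c in range(m): map[r+1][c] += map[r][c]`
def vinner (r t : Nat) (g : List (List Int)) : List (List Int) :=
  (List.range t).foldl (fun g c => pvAdd g (r+1) c (pvGet g r c)) g
def vpass (n m : Nat) (g : List (List Int)) : List (List Int) :=
  (List.range (n-1)).foldl (fun g r => vinner r m g) g

def solution (board : List (List Int)) (skill : List (List Int)) : Int :=
  let n := board.length
  let m := (board.headD []).length
  let map0 : List (List Int) := (List.range n).map (fun _ => (List.range m).map (fun _ => (0 : Int)))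
  let mp := vpass n m (hpass n m (skill.foldl (applySkillA n m) map0))
  -- final loop: `board[r][c] += map[r][c]; if board[r][c] >= 1: answer += 1` (carries the mutated board)
  ((List.range n).foldl (fun st r => (List.range m).foldl (fun st c =>
      let b := pvAdd st.1 r c (pvGet mp r c)
      (b, if 1 ≤ pvGet b r c then st.2 + 1 else st.2)) st) (board, (0 : Int))).2

-- ===== PORT B =====
-- one iteration of B's skill loop: add `degree` to every cell of the rectangle directly
def rectAddB (n m : Nat) (b : List (List Int)) (s : List Int) : List (List Int) :=
  match s with
  | [t, r1, c1, r2, c2, deg0] =>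
    let degree := if t = 1 then -deg0 else deg0
    (PySem.List.pyRange r1 (r2+1) 1).foldl (fun b r =>
      (PySem.List.pyRange c1 (c2+1) 1).foldl (fun b c =>
        pvAdd b (iIdx n r) (iIdx m c) degree) b) b
  | _ => b   -- Python raises ValueError on unpacking; outside Pre_

def solution_alt (board : List (List Int)) (skill : List (List Int)) : Int :=
  let n := board.length
  let m := (board.headD []).length
  let b := skill.foldl (rectAddB n m) board
  (List.range n).foldl (fun a r => (List.range m).foldl (fun a c =>
      if 1 ≤ pvGet b r c then a + 1 else a) a) (0 : Int)

-- ===== PRECONDITION & SPEC =====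
-- Pre_ is the problem's natural domain: a non-empty board (A indexes board[0]), rows at
-- least as long as row 0 (A reads board[r][c] for c < len(board[0])), and each skill a
-- 6-tuple whose rectangle is in range and not inverted.  It excludes inputs on which A
-- still returns: out-of-range or negative rectangle bounds (where A's corner deltas clamp
-- or wrap while B's direct iteration raises), and inverted rectangles (where A's corner
-- arithmetic leaks updates into unrelated rows — an artefact — while B adds nothing).
def Pre_solution (board : List (List Int)) (skill : List (List Int)) : Prop :=
  board ≠ [] ∧
  (∀ row ∈ board, (board.headD []).length ≤ row.length) ∧
  (∀ s ∈ skill, s.length = 6 ∧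
    0 ≤ s.getD 1 0 ∧ s.getD 1 0 ≤ s.getD 3 0 ∧ s.getD 3 0 < (board.length : Int) ∧
    0 ≤ s.getD 2 0 ∧ s.getD 2 0 ≤ s.getD 4 0 ∧ s.getD 4 0 < ((board.headD []).length : Int))
instance (board : List (List Int)) (skill : List (List Int)) : Decidable (Pre_solution board skill) := by
  unfold Pre_solution; infer_instance

def pvWitness_solution : List (List Int) × List (List Int) :=
  ([[0, 1], [2, -1]], [[0, 0, 0, 1, 1, 3], [1, 1, 0, 1, 1, 2]])

def Spec_solution (board : List (List Int)) (skill : List (List Int)) (out : Int) : Prop := out = solution_alt board skill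
instance (board : List (List Int)) (skill : List (List Int)) (out : Int) : Decidable (Spec_solution board skill out) := by unfold Spec_solution; infer_instance

-- ===== CLAIM (what is proved, stated in full; the proofs are below) =====
def Claim_equal_solution : Prop := ∀ (board : List (List Int)) (skill : List (List Int)), Dom_solution board skill → Pre_solution board skill → Spec_solution board skill (solution board skill)

-- ===== LEMMAS AND PROOFS =====

-- row length at index r (getD [] out of range)
def RLen (g : List (List Int)) (r : Nat) : Nat := (g.getD r []).length

theorem length_pvAdd (g : List (List Int)) (i j : Nat) (d : Int) :
    (pvAdd g i j d).length = g.length := by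
  simp [pvAdd]

theorem RLen_pvAdd (g : List (List Int)) (i j : Nat) (d : Int) (r : Nat) :
    RLen (pvAdd g i j d) r = RLen g r := by
  simp only [RLen, pvAdd, List.getD_eq_getElem?_getD, List.getElem?_modify]
  cases h : g[r]? with
  | none => simp
  | some row => by_cases hir : i = r <;> simp [hir]

theorem getD_modify_add (l : List Int) (j c : Nat) (d : Int) :
    (l.modify j (fun x => x + d)).getD c 0 =
      l.getD c 0 + (if j = c ∧ c < l.length then d else 0) := by
  simp only [List.getD_eq_getElem?_getD, List.getElem?_modify]
  cases h : l[c]? with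
  | none =>
    have : ¬ c < l.length := by
      simpa [List.getElem?_eq_none_iff] using h
    simp [this]
  | some x =>
    have : c < l.length := by
      have := List.getElem?_eq_some_iff.mp h
      exact this.1
    by_cases hjc : j = c <;> simp [hjc, this]

theorem pvGet_pvAdd (g : List (List Int)) (i j : Nat) (d : Int) (r c : Nat) :
    pvGet (pvAdd g i j d) r c =
      pvGet g r c + (if i = r ∧ j = c ∧ r < g.length ∧ c < RLen g r then d else 0) := by
  simp only [pvGet, pvAdd, RLen, List.getD_eq_getElem?_getD (l := g.modify _ _),
    List.getD_eq_getElem?_getD (l := g), List.getElem?_modify]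
  cases h : g[r]? with
  | none =>
    have : ¬ r < g.length := by simpa [List.getElem?_eq_none_iff] using h
    simp [this]
  | some row =>
    have hr : r < g.length := (List.getElem?_eq_some_iff.mp h).1
    by_cases hir : i = r
    · subst hir
      simp only [if_true, Option.map_eq_map, Option.getD_some, Option.map_some]
      rw [getD_modify_add]
      simp [hr, List.getD_eq_getElem?_getD, h]
    · simp [hir]

theorem sum_ite_pt (a : Nat) (x : Int) (i : Nat) :
    (∑ r ∈ Finset.range (i+1), (if r = a then x else 0)) = if a ≤ i then x else 0 := by
  simp [Finset.sum_ite_eq', Nat.lt_succ_iff]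

theorem sumRect (a b : Nat) (x : Int) (i j : Nat) :
    (∑ r ∈ Finset.range (i+1), ∑ c ∈ Finset.range (j+1),
        (if r = a ∧ c = b then x else 0)) = if a ≤ i ∧ b ≤ j then x else 0 := by
  have h1 : ∀ r, (∑ c ∈ Finset.range (j+1), (if r = a ∧ c = b then x else 0))
      = if r = a then (if b ≤ j then x else 0) else 0 := by
    intro r
    by_cases hra : r = a
    · simpa [hra] using sum_ite_pt b x j
    · simp [hra]
  simp only [h1]
  rw [sum_ite_pt]
  by_cases hai : a ≤ i <;> by_cases hbj : b ≤ j <;> simp [hai, hbj]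

-- exact pointwise increment performed by one iteration of A's skill loop
def deltaS (n m : Nat) (s : List Int) (r c : Nat) : Int :=
  match s with
  | [t, r1, c1, r2, c2, deg0] =>
    let d := if t = 1 then -deg0 else deg0
    (if iIdx n r1 = r ∧ iIdx m c1 = c ∧ r < n ∧ c < m then d else 0)
    + (if r2 + 1 < (n : Int) then
        (if iIdx n (r2+1) = r ∧ iIdx m c1 = c ∧ r < n ∧ c < m then -d else 0) else 0)
    + (if c2 + 1 < (m : Int) then
        (if iIdx n r1 = r ∧ iIdx m (c2+1) = c ∧ r < n ∧ c < m then -d else 0) else 0)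
    + (if r2 + 1 < (n : Int) ∧ c2 + 1 < (m : Int) then
        (if iIdx n (r2+1) = r ∧ iIdx m (c2+1) = c ∧ r < n ∧ c < m then d else 0) else 0)
  | _ => 0

-- pointwise increment performed by one iteration of B's skill loop
def rectS (s : List Int) (i j : Nat) : Int :=
  match s with
  | [t, r1, c1, r2, c2, deg0] =>
    let d := if t = 1 then -deg0 else deg0
    if r1 ≤ (i : Int) ∧ (i : Int) ≤ r2 ∧ c1 ≤ (j : Int) ∧ (j : Int) ≤ c2 then d else 0
  | _ => 0

-- shape of the zero grid and of grids obtained from it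
def MShape (g : List (List Int)) (n m : Nat) : Prop :=
  g.length = n ∧ ∀ r, RLen g r = if r < n then m else 0

theorem length_applySkillA (n m : Nat) (g : List (List Int)) (s : List Int) :
    (applySkillA n m g s).length = g.length := by
  rcases s with _ | ⟨t, _ | ⟨a1, _ | ⟨b1, _ | ⟨a2, _ | ⟨b2, _ | ⟨d0, _ | ⟨x, s⟩⟩⟩⟩⟩⟩⟩ <;>
    simp [applySkillA] <;> split_ifs <;> simp [length_pvAdd]

theorem RLen_applySkillA (n m : Nat) (g : List (List Int)) (s : List Int) (r : Nat) :
    RLen (applySkillA n m g s) r = RLen g r := by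
  rcases s with _ | ⟨t, _ | ⟨a1, _ | ⟨b1, _ | ⟨a2, _ | ⟨b2, _ | ⟨d0, _ | ⟨x, s⟩⟩⟩⟩⟩⟩⟩ <;>
    simp [applySkillA] <;> split_ifs <;> simp [RLen_pvAdd]

theorem pvGet_applySkillA (n m : Nat) (g : List (List Int)) (s : List Int)
    (h1 : g.length = n) (h2 : ∀ q, RLen g q = if q < n then m else 0) (r c : Nat) :
    pvGet (applySkillA n m g s) r c = pvGet g r c + deltaS n m s r c := by
  have hfix : ∀ (gg : List (List Int)) (i j : Nat) (d : Int),
      gg.length = n → (∀ q, RLen gg q = if q < n then m else 0) →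
      pvGet (pvAdd gg i j d) r c
        = pvGet gg r c + (if i = r ∧ j = c ∧ r < n ∧ c < m then d else 0) := by
    intro gg i j d hl hr
    rw [pvGet_pvAdd, hl, hr]
    by_cases hrn : r < n <;> simp [hrn]
  have key : ∀ (gg : List (List Int)) (P : Prop) [inst : Decidable P] (i j : Nat) (d : Int),
      gg.length = n → (∀ q, RLen gg q = if q < n then m else 0) →
      ((if P then pvAdd gg i j d else gg).length = n ∧
       (∀ q, RLen (if P then pvAdd gg i j d else gg) q = if q < n then m else 0) ∧
       pvGet (if P then pvAdd gg i j d else gg) r c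
         = pvGet gg r c + (if P then (if i = r ∧ j = c ∧ r < n ∧ c < m then d else 0) else 0)) := by
    intro gg P inst i j d hl hr
    by_cases hP : P
    · simp only [if_pos hP]
      exact ⟨by rw [length_pvAdd, hl], fun q => by rw [RLen_pvAdd, hr],
        hfix gg i j d hl hr⟩
    · simp only [if_neg hP]
      exact ⟨hl, hr, by simp⟩
  rcases s with _ | ⟨t, _ | ⟨a1, _ | ⟨b1, _ | ⟨a2, _ | ⟨b2, _ | ⟨d0, _ | ⟨x, s⟩⟩⟩⟩⟩⟩⟩ <;>
    simp only [applySkillA, deltaS] <;> try simp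
  have hg1L : (pvAdd g (iIdx n a1) (iIdx m b1) (if t = 1 then -d0 else d0)).length = n := by
    rw [length_pvAdd, h1]
  have hg1R : ∀ q, RLen (pvAdd g (iIdx n a1) (iIdx m b1) (if t = 1 then -d0 else d0)) q
      = if q < n then m else 0 := fun q => by rw [RLen_pvAdd, h2]
  obtain ⟨L2, R2, V2⟩ := key _ (a2 + 1 < (n : Int)) (iIdx n (a2+1)) (iIdx m b1)
      (-(if t = 1 then -d0 else d0)) hg1L hg1R
  obtain ⟨L3, R3, V3⟩ := key _ (b2 + 1 < (m : Int)) (iIdx n a1) (iIdx m (b2+1))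
      (-(if t = 1 then -d0 else d0)) L2 R2
  obtain ⟨_, _, V4⟩ := key _ (a2 + 1 < (n : Int) ∧ b2 + 1 < (m : Int))
      (iIdx n (a2+1)) (iIdx m (b2+1)) (if t = 1 then -d0 else d0) L3 R3
  rw [V4, V3, V2, hfix g (iIdx n a1) (iIdx m b1) (if t = 1 then -d0 else d0) h1 h2]
  ring

theorem skillfoldA_len (n m : Nat) (sk : List (List Int)) (g : List (List Int)) :
    (sk.foldl (applySkillA n m) g).length = g.length := by
  induction sk generalizing g with
  | nil => rfl
  | cons s sk ih => simpa [List.foldl_cons, length_applySkillA] using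
      (ih (applySkillA n m g s)).trans (length_applySkillA n m g s)

theorem skillfoldA_RLen (n m : Nat) (sk : List (List Int)) (g : List (List Int)) (r : Nat) :
    RLen (sk.foldl (applySkillA n m) g) r = RLen g r := by
  induction sk generalizing g with
  | nil => rfl
  | cons s sk ih => simpa [List.foldl_cons] using
      (ih (applySkillA n m g s)).trans (RLen_applySkillA n m g s r)

theorem skillfoldA_get (n m : Nat) (sk : List (List Int)) (g : List (List Int))
    (h1 : g.length = n) (h2 : ∀ q, RLen g q = if q < n then m else 0) (r c : Nat) :
    pvGet (sk.foldl (applySkillA n m) g) r c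
      = pvGet g r c + (sk.map (fun s => deltaS n m s r c)).sum := by
  induction sk generalizing g with
  | nil => simp
  | cons s sk ih =>
    have h1' : (applySkillA n m g s).length = n := by rw [length_applySkillA, h1]
    have h2' : ∀ q, RLen (applySkillA n m g s) q = if q < n then m else 0 := by
      intro q; rw [RLen_applySkillA, h2]
    rw [List.foldl_cons, ih _ h1' h2', pvGet_applySkillA n m g s h1 h2]
    simp [add_assoc]

theorem hinner_spec (g : List (List Int)) (r t : Nat) (hr : r < g.length)
    (ht : t = 0 ∨ t < RLen g r) :
    (hinner r t g).length = g.length ∧ (∀ q, RLen (hinner r t g) q = RLen g q) ∧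
    (∀ i j, pvGet (hinner r t g) i j =
      if i = r ∧ j ≤ t then ∑ c ∈ Finset.range (j+1), pvGet g r c else pvGet g i j) := by
  induction t with
  | zero =>
    refine ⟨rfl, fun q => rfl, fun i j => ?_⟩
    show pvGet g i j = _
    by_cases h : i = r ∧ j ≤ 0
    · obtain ⟨h1, h2⟩ := h
      have hj : j = 0 := Nat.le_zero.mp h2
      subst h1; subst hj
      simp
    · rw [if_neg h]
  | succ t ih =>
    have ht' : t = 0 ∨ t < RLen g r := by
      rcases ht with h | h
      · omega
      · right; omega
    obtain ⟨L, R, V⟩ := ih ht'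
    have htR : t + 1 < RLen g r := by
      rcases ht with h | h
      · omega
      · exact h
    have hstep : hinner r (t+1) g = pvAdd (hinner r t g) r (t+1) (pvGet (hinner r t g) r t) := by
      simp [hinner, List.range_succ]
    refine ⟨by rw [hstep, length_pvAdd, L], fun q => by rw [hstep, RLen_pvAdd, R], fun i j => ?_⟩
    rw [hstep, pvGet_pvAdd, L, R i, V r t,
      if_pos (show r = r ∧ t ≤ t from ⟨rfl, le_refl t⟩), V i j]
    by_cases hi : i = r
    · subst hi
      by_cases hj : j = t + 1
      · subst hj
        rw [if_neg (show ¬(i = i ∧ t + 1 ≤ t) by omega),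
          if_pos (show i = i ∧ t + 1 = t + 1 ∧ i < g.length ∧ t + 1 < RLen g i from
            ⟨rfl, rfl, hr, htR⟩),
          if_pos (show i = i ∧ t + 1 ≤ t + 1 by omega),
          Finset.sum_range_succ (f := fun c => pvGet g i c) (n := t + 1)]
        ring
      · rw [if_neg (show ¬(i = i ∧ t + 1 = j ∧ i < g.length ∧ j < RLen g i) from
            fun h => hj h.2.1.symm)]
        by_cases hjt : j ≤ t
        · rw [if_pos (show i = i ∧ j ≤ t from ⟨rfl, hjt⟩),
            if_pos (show i = i ∧ j ≤ t + 1 by omega)]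
          ring
        · rw [if_neg (show ¬(i = i ∧ j ≤ t) by omega),
            if_neg (show ¬(i = i ∧ j ≤ t + 1) by omega)]
          ring
    · rw [if_neg (show ¬(i = r ∧ j ≤ t) from fun h => hi h.1),
        if_neg (show ¬(r = i ∧ t + 1 = j ∧ i < g.length ∧ j < RLen g i) from fun h => hi h.1.symm),
        if_neg (show ¬(i = r ∧ j ≤ t + 1) from fun h => hi h.1)]
      ring

theorem houter_spec (g : List (List Int)) (m K : Nat) (hK : K ≤ g.length)
    (hm : ∀ q < g.length, m ≤ RLen g q) :
    (((List.range K).foldl (fun g r => hinner r (m-1) g) g).length = g.length) ∧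
    (∀ q, RLen ((List.range K).foldl (fun g r => hinner r (m-1) g) g) q = RLen g q) ∧
    (∀ i j, (K ≤ i → pvGet ((List.range K).foldl (fun g r => hinner r (m-1) g) g) i j = pvGet g i j) ∧
      (i < K → j < m → pvGet ((List.range K).foldl (fun g r => hinner r (m-1) g) g) i j
        = ∑ c ∈ Finset.range (j+1), pvGet g i c)) := by
  induction K with
  | zero => exact ⟨rfl, fun q => rfl, fun i j => ⟨fun _ => rfl, fun h => absurd h (Nat.not_lt_zero i)⟩⟩
  | succ K ih =>
    obtain ⟨L, R, V⟩ := ih (by omega)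
    have hstep : (List.range (K+1)).foldl (fun g r => hinner r (m-1) g) g
        = hinner K (m-1) ((List.range K).foldl (fun g r => hinner r (m-1) g) g) := by
      simp [List.range_succ]
    have hKlt : K < g.length := by omega
    have hKL : K < ((List.range K).foldl (fun g r => hinner r (m-1) g) g).length := by omega
    have htc : m - 1 = 0 ∨ m - 1 < RLen ((List.range K).foldl (fun g r => hinner r (m-1) g) g) K := by
      rw [R K]
      have := hm K hKlt
      omega
    obtain ⟨L2, R2, V2⟩ := hinner_spec _ K (m-1) hKL htc
    refine ⟨by rw [hstep, L2, L], fun q => by rw [hstep, R2, R],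
      fun i j => ⟨fun hKi => ?_, fun hiK hjm => ?_⟩⟩
    · rw [hstep, V2 i j, if_neg (show ¬(i = K ∧ j ≤ m - 1) by omega), (V i j).1 (by omega)]
    · rw [hstep, V2 i j]
      by_cases hiK' : i < K
      · rw [if_neg (show ¬(i = K ∧ j ≤ m - 1) by omega), (V i j).2 hiK' hjm]
      · have hiEq : i = K := by omega
        subst hiEq
        rw [if_pos (show i = i ∧ j ≤ m - 1 by omega)]
        exact Finset.sum_congr rfl (fun c hc => (V i c).1 (le_refl i))

theorem vinner_spec (g : List (List Int)) (k t : Nat) (hk : k + 1 < g.length)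
    (ht : t ≤ RLen g (k+1)) :
    (vinner k t g).length = g.length ∧ (∀ q, RLen (vinner k t g) q = RLen g q) ∧
    (∀ i j, pvGet (vinner k t g) i j =
      pvGet g i j + if i = k + 1 ∧ j < t then pvGet g k j else 0) := by
  induction t with
  | zero => exact ⟨rfl, fun q => rfl, fun i j => by simp [vinner]⟩
  | succ t ih =>
    obtain ⟨L, R, V⟩ := ih (by omega)
    have hstep : vinner k (t+1) g = pvAdd (vinner k t g) (k+1) t (pvGet (vinner k t g) k t) := by
      simp [vinner, List.range_succ]
    refine ⟨by rw [hstep, length_pvAdd, L], fun q => by rw [hstep, RLen_pvAdd, R], fun i j => ?_⟩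
    have hkk : pvGet (vinner k t g) k t = pvGet g k t := by
      rw [V k t, if_neg (show ¬(k = k + 1 ∧ t < t) by omega)]
      ring
    rw [hstep, pvGet_pvAdd, L, R i, hkk, V i j]
    by_cases hi : i = k + 1
    · subst hi
      by_cases hj : j = t
      · subst hj
        rw [if_neg (show ¬(k + 1 = k + 1 ∧ j < j) by omega),
          if_pos (show k + 1 = k + 1 ∧ j = j ∧ k + 1 < g.length ∧ j < RLen g (k+1) from
            ⟨rfl, rfl, hk, by omega⟩),
          if_pos (show k + 1 = k + 1 ∧ j < j + 1 by omega)]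
        ring
      · rw [if_neg (show ¬(k + 1 = k + 1 ∧ t = j ∧ k + 1 < g.length ∧ j < RLen g (k+1)) from
            fun h => hj h.2.1.symm)]
        by_cases hjt : j < t
        · rw [if_pos (show k + 1 = k + 1 ∧ j < t from ⟨rfl, hjt⟩),
            if_pos (show k + 1 = k + 1 ∧ j < t + 1 by omega)]
          ring
        · rw [if_neg (show ¬(k + 1 = k + 1 ∧ j < t) by omega),
            if_neg (show ¬(k + 1 = k + 1 ∧ j < t + 1) by omega)]
          ring
    · rw [if_neg (show ¬(i = k + 1 ∧ j < t) from fun h => hi h.1),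
        if_neg (show ¬(k + 1 = i ∧ t = j ∧ i < g.length ∧ j < RLen g i) from fun h => hi h.1.symm),
        if_neg (show ¬(i = k + 1 ∧ j < t + 1) from fun h => hi h.1)]
      ring

theorem vouter_spec (g : List (List Int)) (m K : Nat) (hK : K + 1 ≤ g.length)
    (hm : ∀ q < g.length, m ≤ RLen g q) :
    (((List.range K).foldl (fun g r => vinner r m g) g).length = g.length) ∧
    (∀ q, RLen ((List.range K).foldl (fun g r => vinner r m g) g) q = RLen g q) ∧
    (∀ i j, j < m → pvGet ((List.range K).foldl (fun g r => vinner r m g) g) i j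
      = if i ≤ K then ∑ r ∈ Finset.range (i+1), pvGet g r j else pvGet g i j) := by
  induction K with
  | zero =>
    refine ⟨rfl, fun q => rfl, fun i j hj => ?_⟩
    show pvGet g i j = _
    by_cases hi : i ≤ 0
    · have : i = 0 := by omega
      subst this
      simp
    · rw [if_neg hi]
  | succ K ih =>
    obtain ⟨L, R, V⟩ := ih (by omega)
    have hstep : (List.range (K+1)).foldl (fun g r => vinner r m g) g
        = vinner K m ((List.range K).foldl (fun g r => vinner r m g) g) := by
      simp [List.range_succ]
    have hk2 : K + 1 < ((List.range K).foldl (fun g r => vinner r m g) g).length := by omega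
    have htm : m ≤ RLen ((List.range K).foldl (fun g r => vinner r m g) g) (K+1) := by
      rw [R]; exact hm (K+1) (by omega)
    obtain ⟨L2, R2, V2⟩ := vinner_spec _ K m hk2 htm
    refine ⟨by rw [hstep, L2, L], fun q => by rw [hstep, R2, R], fun i j hj => ?_⟩
    rw [hstep, V2 i j]
    by_cases hi : i ≤ K
    · rw [if_neg (show ¬(i = K + 1 ∧ j < m) by omega), V i j hj, if_pos hi,
        if_pos (show i ≤ K + 1 by omega)]
      ring
    · by_cases hi2 : i = K + 1
      · subst hi2
        rw [if_pos (show K + 1 = K + 1 ∧ j < m from ⟨rfl, hj⟩), V _ j hj, if_neg hi,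
          V K j hj, if_pos (show K ≤ K by omega), if_pos (show K + 1 ≤ K + 1 by omega),
          Finset.sum_range_succ (f := fun r => pvGet g r j) (n := K + 1)]
        ring
      · rw [if_neg (show ¬(i = K + 1 ∧ j < m) by omega), V i j hj, if_neg hi,
          if_neg (show ¬(i ≤ K + 1) by omega)]
        ring

theorem iIdx_nonneg (len : Nat) (i : Int) (h : 0 ≤ i) : iIdx len i = i.toNat := by
  unfold iIdx
  rw [if_neg (by omega)]

theorem binner_spec (b : List (List Int)) (R : Nat) (d : Int) (lo : Int) (m : Nat) (k : Nat)
    (hlo : 0 ≤ lo) (hR : R < b.length) (hlen : lo + k ≤ (RLen b R : Int)) :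
    (((PySem.List.pyRange lo (lo + k) 1).foldl (fun b c => pvAdd b R (iIdx m c) d) b).length = b.length) ∧
    (∀ q, RLen ((PySem.List.pyRange lo (lo + k) 1).foldl (fun b c => pvAdd b R (iIdx m c) d) b) q = RLen b q) ∧
    (∀ i j, pvGet ((PySem.List.pyRange lo (lo + k) 1).foldl (fun b c => pvAdd b R (iIdx m c) d) b) i j
      = pvGet b i j + if i = R ∧ lo ≤ (j : Int) ∧ (j : Int) < lo + k then d else 0) := by
  induction k with
  | zero =>
    rw [show lo + ((0 : Nat) : Int) = lo by omega, PySem.List.pyRange_one_eq_nil (le_refl lo)]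
    exact ⟨rfl, fun q => rfl, fun i j => by
      rw [if_neg (show ¬(i = R ∧ lo ≤ (j:Int) ∧ (j:Int) < lo) by omega)]
      simp⟩
  | succ k ih =>
    have hcast : lo + ((k + 1 : Nat) : Int) = (lo + k) + 1 := by push_cast; ring
    obtain ⟨L, Rl, V⟩ := ih (by omega)
    have hsplit : PySem.List.pyRange lo (lo + ((k+1 : Nat) : Int)) 1
        = PySem.List.pyRange lo (lo + k) 1 ++ [lo + k] := by
      rw [hcast, PySem.List.pyRange_one_succ_right (by omega)]
    rw [hsplit, List.foldl_append]
    simp only [List.foldl_cons, List.foldl_nil]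
    rw [iIdx_nonneg m (lo + k) (by omega)]
    refine ⟨by rw [length_pvAdd, L], fun q => by rw [RLen_pvAdd, Rl], fun i j => ?_⟩
    rw [pvGet_pvAdd, L, Rl i, V i j]
    by_cases hi : i = R
    · subst hi
      by_cases hj : (j : Int) = lo + k
      · rw [if_pos (show i = i ∧ (lo + k).toNat = j ∧ i < b.length ∧ j < RLen b i from
            ⟨rfl, by omega, hR, by omega⟩),
          if_neg (show ¬(i = i ∧ lo ≤ (j:Int) ∧ (j:Int) < lo + k) by omega),
          if_pos (show i = i ∧ lo ≤ (j:Int) ∧ (j:Int) < lo + ((k+1:Nat):Int) by omega)]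
        ring
      · rw [if_neg (show ¬(i = i ∧ (lo + k).toNat = j ∧ i < b.length ∧ j < RLen b i) by omega)]

        by_cases hjr : lo ≤ (j : Int) ∧ (j : Int) < lo + k
        · rw [if_pos (show i = i ∧ lo ≤ (j:Int) ∧ (j:Int) < lo + k from ⟨rfl, hjr.1, hjr.2⟩),
            if_pos (show i = i ∧ lo ≤ (j:Int) ∧ (j:Int) < lo + ((k+1:Nat):Int) by omega)]
          ring
        · rw [if_neg (show ¬(i = i ∧ lo ≤ (j:Int) ∧ (j:Int) < lo + k) by omega),
            if_neg (show ¬(i = i ∧ lo ≤ (j:Int) ∧ (j:Int) < lo + ((k+1:Nat):Int)) by omega)]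
          ring
    · rw [if_neg (show ¬(i = R ∧ lo ≤ (j:Int) ∧ (j:Int) < lo + k) from fun h => hi h.1),
        if_neg (show ¬(R = i ∧ (lo + k).toNat = j ∧ i < b.length ∧ j < RLen b i) from fun h => hi h.1.symm),
        if_neg (show ¬(i = R ∧ lo ≤ (j:Int) ∧ (j:Int) < lo + ((k+1:Nat):Int)) from fun h => hi h.1)]
      ring

theorem bouter_spec (b : List (List Int)) (n m : Nat) (d : Int) (rlo clo : Int) (kc : Nat) (kr : Nat)
    (hrlo : 0 ≤ rlo) (hclo : 0 ≤ clo) (hkr : rlo + kr ≤ (n : Int)) (hkc : clo + kc ≤ (m : Int))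
    (hn : b.length = n) (hm : ∀ q < b.length, m ≤ RLen b q) :
    (((PySem.List.pyRange rlo (rlo + kr) 1).foldl (fun b r =>
        (PySem.List.pyRange clo (clo + kc) 1).foldl (fun b c => pvAdd b (iIdx n r) (iIdx m c) d) b) b).length = b.length) ∧
    (∀ q, RLen ((PySem.List.pyRange rlo (rlo + kr) 1).foldl (fun b r =>
        (PySem.List.pyRange clo (clo + kc) 1).foldl (fun b c => pvAdd b (iIdx n r) (iIdx m c) d) b) b) q = RLen b q) ∧
    (∀ i j, pvGet ((PySem.List.pyRange rlo (rlo + kr) 1).foldl (fun b r =>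
        (PySem.List.pyRange clo (clo + kc) 1).foldl (fun b c => pvAdd b (iIdx n r) (iIdx m c) d) b) b) i j
      = pvGet b i j + if rlo ≤ (i : Int) ∧ (i : Int) < rlo + kr ∧ clo ≤ (j : Int) ∧ (j : Int) < clo + kc then d else 0) := by
  induction kr with
  | zero =>
    rw [show rlo + ((0 : Nat) : Int) = rlo by omega, PySem.List.pyRange_one_eq_nil (le_refl rlo)]
    exact ⟨rfl, fun q => rfl, fun i j => by
      rw [if_neg (show ¬(rlo ≤ (i:Int) ∧ (i:Int) < rlo ∧ clo ≤ (j:Int) ∧ (j:Int) < clo + kc) by omega)]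
      simp⟩
  | succ kr ih =>
    have hcast : rlo + ((kr + 1 : Nat) : Int) = (rlo + kr) + 1 := by push_cast; ring
    obtain ⟨L, Rl, V⟩ := ih (by omega)
    have hsplit : PySem.List.pyRange rlo (rlo + ((kr+1 : Nat) : Int)) 1
        = PySem.List.pyRange rlo (rlo + kr) 1 ++ [rlo + kr] := by
      rw [hcast, PySem.List.pyRange_one_succ_right (by omega)]
    rw [hsplit, List.foldl_append]
    simp only [List.foldl_cons, List.foldl_nil]
    rw [iIdx_nonneg n (rlo + kr) (by omega)]
    have hRlt : (rlo + kr).toNat < (List.foldl (fun b r => (PySem.List.pyRange clo (clo + kc) 1).foldl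
        (fun b c => pvAdd b (iIdx n r) (iIdx m c) d) b) b (PySem.List.pyRange rlo (rlo + kr) 1)).length := by
      rw [L, hn]; omega
    have hlen2 : clo + kc ≤ (RLen (List.foldl (fun b r => (PySem.List.pyRange clo (clo + kc) 1).foldl
        (fun b c => pvAdd b (iIdx n r) (iIdx m c) d) b) b (PySem.List.pyRange rlo (rlo + kr) 1)) ((rlo + kr).toNat) : Int) := by
      rw [Rl]
      have := hm ((rlo + kr).toNat) (by omega)
      omega
    obtain ⟨L2, R2, V2⟩ := binner_spec _ ((rlo + kr).toNat) d clo m kc hclo hRlt hlen2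
    refine ⟨by rw [L2, L], fun q => by rw [R2, Rl], fun i j => ?_⟩
    rw [V2 i j, V i j]
    by_cases hi : i = (rlo + kr).toNat
    · subst hi
      rw [if_neg (show ¬(rlo ≤ (((rlo+kr).toNat : Nat) : Int) ∧ (((rlo+kr).toNat : Nat) : Int) < rlo + kr ∧ clo ≤ (j:Int) ∧ (j:Int) < clo + kc) by omega)]
      by_cases hj : clo ≤ (j : Int) ∧ (j : Int) < clo + kc
      · rw [if_pos ⟨rfl, hj.1, hj.2⟩,
          if_pos (show rlo ≤ (((rlo+kr).toNat : Nat) : Int) ∧ (((rlo+kr).toNat : Nat) : Int) < rlo + ((kr+1:Nat):Int) ∧ clo ≤ (j:Int) ∧ (j:Int) < clo + kc by omega)]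
        ring
      · rw [if_neg (show ¬((rlo+kr).toNat = (rlo+kr).toNat ∧ clo ≤ (j:Int) ∧ (j:Int) < clo + kc) by omega),
          if_neg (show ¬(rlo ≤ (((rlo+kr).toNat : Nat) : Int) ∧ (((rlo+kr).toNat : Nat) : Int) < rlo + ((kr+1:Nat):Int) ∧ clo ≤ (j:Int) ∧ (j:Int) < clo + kc) by omega)]
        ring
    · rw [if_neg (show ¬(i = (rlo+kr).toNat ∧ clo ≤ (j:Int) ∧ (j:Int) < clo + kc) from fun h => hi h.1)]
      by_cases hir : rlo ≤ (i : Int) ∧ (i : Int) < rlo + kr ∧ clo ≤ (j:Int) ∧ (j:Int) < clo + kc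
      · rw [if_pos hir, if_pos (show rlo ≤ (i:Int) ∧ (i:Int) < rlo + ((kr+1:Nat):Int) ∧ clo ≤ (j:Int) ∧ (j:Int) < clo + kc by omega)]
        ring
      · rw [if_neg hir, if_neg (show ¬(rlo ≤ (i:Int) ∧ (i:Int) < rlo + ((kr+1:Nat):Int) ∧ clo ≤ (j:Int) ∧ (j:Int) < clo + kc) by omega)]
        ring

theorem rectAddB_spec (n m : Nat) (b : List (List Int)) (s : List Int)
    (hn : b.length = n) (hm : ∀ q < b.length, m ≤ RLen b q)
    (hs : s.length = 6 ∧ 0 ≤ s.getD 1 0 ∧ s.getD 1 0 ≤ s.getD 3 0 ∧ s.getD 3 0 < (n : Int) ∧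
          0 ≤ s.getD 2 0 ∧ s.getD 2 0 ≤ s.getD 4 0 ∧ s.getD 4 0 < (m : Int)) :
    ((rectAddB n m b s).length = b.length) ∧ (∀ q, RLen (rectAddB n m b s) q = RLen b q) ∧
    (∀ i j, pvGet (rectAddB n m b s) i j = pvGet b i j + rectS s i j) := by
  obtain ⟨hs6, h1, h2, h3, h4, h5, h6⟩ := hs
  rcases s with _ | ⟨t, _ | ⟨a1, _ | ⟨b1, _ | ⟨a2, _ | ⟨b2, _ | ⟨d0, _ | ⟨x, s⟩⟩⟩⟩⟩⟩⟩ <;>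
    simp only [List.length_nil, List.length_cons] at hs6 <;> try omega
  simp only [List.getD_cons_succ, List.getD_cons_zero] at h1 h2 h3 h4 h5 h6
  simp only [rectAddB]
  have e1 : (a2 + 1 : Int) = a1 + (((a2 + 1 - a1).toNat : Nat) : Int) := by omega
  have e2 : (b2 + 1 : Int) = b1 + (((b2 + 1 - b1).toNat : Nat) : Int) := by omega
  rw [e1, e2]
  obtain ⟨L, R, V⟩ := bouter_spec b n m (if t = 1 then -d0 else d0) a1 b1
    ((b2 + 1 - b1).toNat) ((a2 + 1 - a1).toNat)
    (by omega) (by omega) (by omega) (by omega) hn hm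
  refine ⟨L, R, fun i j => ?_⟩
  rw [V i j]
  simp only [rectS]
  split_ifs <;> omega

theorem skillfoldB_spec (n m : Nat) (sk : List (List Int)) (b : List (List Int))
    (hn : b.length = n) (hm : ∀ q < b.length, m ≤ RLen b q)
    (hsk : ∀ s ∈ sk, s.length = 6 ∧ 0 ≤ s.getD 1 0 ∧ s.getD 1 0 ≤ s.getD 3 0 ∧ s.getD 3 0 < (n : Int) ∧
          0 ≤ s.getD 2 0 ∧ s.getD 2 0 ≤ s.getD 4 0 ∧ s.getD 4 0 < (m : Int)) :
    ((sk.foldl (rectAddB n m) b).length = b.length) ∧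
    (∀ q, RLen (sk.foldl (rectAddB n m) b) q = RLen b q) ∧
    (∀ i j, pvGet (sk.foldl (rectAddB n m) b) i j
      = pvGet b i j + (sk.map (fun s => rectS s i j)).sum) := by
  induction sk generalizing b with
  | nil => exact ⟨rfl, fun q => rfl, fun i j => by simp⟩
  | cons s sk ih =>
    obtain ⟨L1, R1, V1⟩ := rectAddB_spec n m b s hn hm (hsk s (List.mem_cons_self))
    obtain ⟨L2, R2, V2⟩ := ih (rectAddB n m b s) (by rw [L1, hn])
      (fun q hq => by rw [R1]; exact hm q (by rwa [L1] at hq))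
      (fun s' hs' => hsk s' (List.mem_cons_of_mem _ hs'))
    refine ⟨by rw [List.foldl_cons, L2, L1], fun q => by rw [List.foldl_cons, R2, R1],
      fun i j => ?_⟩
    rw [List.foldl_cons, V2 i j, V1 i j]
    simp [add_assoc]

theorem pt_norm (x y n m : Nat) (hx : x < n) (hy : y < m) (v : Int) (r c : Nat) :
    (if x = r ∧ y = c ∧ r < n ∧ c < m then v else 0) = (if r = x ∧ c = y then v else 0) := by
  split_ifs <;> omega

theorem delta_rect (n m : Nat) (s : List Int)
    (hs : s.length = 6 ∧ 0 ≤ s.getD 1 0 ∧ s.getD 1 0 ≤ s.getD 3 0 ∧ s.getD 3 0 < (n : Int) ∧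
          0 ≤ s.getD 2 0 ∧ s.getD 2 0 ≤ s.getD 4 0 ∧ s.getD 4 0 < (m : Int))
    (i j : Nat) (hi : i < n) (hj : j < m) :
    (∑ r ∈ Finset.range (i+1), ∑ c ∈ Finset.range (j+1), deltaS n m s r c) = rectS s i j := by
  obtain ⟨hs6, h1, h2, h3, h4, h5, h6⟩ := hs
  rcases s with _ | ⟨t, _ | ⟨a1, _ | ⟨b1, _ | ⟨a2, _ | ⟨b2, _ | ⟨d0, _ | ⟨x, s⟩⟩⟩⟩⟩⟩⟩ <;>
    simp only [List.length_nil, List.length_cons] at hs6 <;> try omega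
  simp only [List.getD_cons_succ, List.getD_cons_zero] at h1 h2 h3 h4 h5 h6
  simp only [deltaS, rectS,
    iIdx_nonneg n a1 (by omega), iIdx_nonneg m b1 (by omega),
    iIdx_nonneg n (a2 + 1) (by omega), iIdx_nonneg m (b2 + 1) (by omega)]
  by_cases hP : a2 + 1 < (n : Int) <;> by_cases hQ : b2 + 1 < (m : Int)
  · simp only [if_pos hP, if_pos hQ,
      if_pos (show (a2 + 1 < (n:Int)) ∧ (b2 + 1 < (m:Int)) from ⟨hP, hQ⟩),
      pt_norm a1.toNat b1.toNat n m (by omega) (by omega),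
      pt_norm (a2+1).toNat b1.toNat n m (by omega) (by omega),
      pt_norm a1.toNat (b2+1).toNat n m (by omega) (by omega),
      pt_norm (a2+1).toNat (b2+1).toNat n m (by omega) (by omega),
      Finset.sum_add_distrib, sumRect]
    split_ifs <;> omega
  · simp only [if_pos hP, if_neg hQ,
      if_neg (show ¬((a2 + 1 < (n:Int)) ∧ (b2 + 1 < (m:Int))) from fun h => hQ h.2),
      pt_norm a1.toNat b1.toNat n m (by omega) (by omega),
      pt_norm (a2+1).toNat b1.toNat n m (by omega) (by omega),
      add_zero, Finset.sum_add_distrib, sumRect]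
    split_ifs <;> omega
  · simp only [if_neg hP, if_pos hQ,
      if_neg (show ¬((a2 + 1 < (n:Int)) ∧ (b2 + 1 < (m:Int))) from fun h => hP h.1),
      pt_norm a1.toNat b1.toNat n m (by omega) (by omega),
      pt_norm a1.toNat (b2+1).toNat n m (by omega) (by omega),
      add_zero, Finset.sum_add_distrib, sumRect]
    split_ifs <;> omega
  · simp only [if_neg hP, if_neg hQ,
      if_neg (show ¬((a2 + 1 < (n:Int)) ∧ (b2 + 1 < (m:Int))) from fun h => hP h.1),
      pt_norm a1.toNat b1.toNat n m (by omega) (by omega),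
      add_zero, Finset.sum_add_distrib, sumRect]
    split_ifs <;> omega

theorem listsum_swap (n m : Nat) (sk : List (List Int))
    (hsk : ∀ s ∈ sk, s.length = 6 ∧ 0 ≤ s.getD 1 0 ∧ s.getD 1 0 ≤ s.getD 3 0 ∧ s.getD 3 0 < (n : Int) ∧
          0 ≤ s.getD 2 0 ∧ s.getD 2 0 ≤ s.getD 4 0 ∧ s.getD 4 0 < (m : Int))
    (i j : Nat) (hi : i < n) (hj : j < m) :
    (∑ r ∈ Finset.range (i+1), ∑ c ∈ Finset.range (j+1), (sk.map (fun s => deltaS n m s r c)).sum)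
      = (sk.map (fun s => rectS s i j)).sum := by
  induction sk with
  | nil => simp
  | cons s sk ih =>
    simp only [List.map_cons, List.sum_cons]
    calc (∑ r ∈ Finset.range (i+1), ∑ c ∈ Finset.range (j+1),
            (deltaS n m s r c + (sk.map (fun s => deltaS n m s r c)).sum))
        = (∑ r ∈ Finset.range (i+1), ∑ c ∈ Finset.range (j+1), deltaS n m s r c)
          + (∑ r ∈ Finset.range (i+1), ∑ c ∈ Finset.range (j+1),
              (sk.map (fun s => deltaS n m s r c)).sum) := by
          simp [Finset.sum_add_distrib]
      _ = rectS s i j + (sk.map (fun s => rectS s i j)).sum := by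
          rw [delta_rect n m s (hsk s List.mem_cons_self) i j hi hj,
            ih (fun s' hs' => hsk s' (List.mem_cons_of_mem _ hs'))]

theorem map0_len (n m : Nat) :
    ((List.range n).map (fun _ => (List.range m).map (fun _ => (0:Int)))).length = n := by simp

theorem map0_row (n m r : Nat) :
    ((List.range n).map (fun _ => (List.range m).map (fun _ => (0:Int)))).getD r []
      = if r < n then (List.range m).map (fun _ => (0:Int)) else [] := by
  rw [List.getD_eq_getElem?_getD, List.getElem?_map]
  by_cases hr : r < n
  · rw [List.getElem?_range hr]
    simp [hr]
  · rw [List.getElem?_eq_none_iff.mpr (by simpa using Nat.le_of_not_lt hr)]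
    simp [hr]

theorem map0_RLen (n m q : Nat) :
    RLen ((List.range n).map (fun _ => (List.range m).map (fun _ => (0:Int)))) q
      = if q < n then m else 0 := by
  unfold RLen
  rw [map0_row]
  split_ifs <;> simp

theorem map0_get (n m r c : Nat) :
    pvGet ((List.range n).map (fun _ => (List.range m).map (fun _ => (0:Int)))) r c = 0 := by
  unfold pvGet
  rw [map0_row]
  split_ifs with hr
  · rw [List.getD_eq_getElem?_getD, List.getElem?_map]
    by_cases hc : c < m
    · rw [List.getElem?_range hc]
      simp
    · rw [List.getElem?_eq_none_iff.mpr (by simpa using Nat.le_of_not_lt hc)]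
      simp
  · simp

theorem countInner_spec (st : List (List Int) × Int) (v : Nat → Nat → Int) (r m : Nat) (t : Nat)
    (hr : r < st.1.length) (htm : t ≤ m) (hmr : m ≤ RLen st.1 r) :
    ((((List.range t).foldl (fun st c =>
        (pvAdd st.1 r c (v r c), if 1 ≤ pvGet (pvAdd st.1 r c (v r c)) r c then st.2 + 1 else st.2))
        st).1.length = st.1.length) ∧
     (∀ q, RLen (((List.range t).foldl (fun st c =>
        (pvAdd st.1 r c (v r c), if 1 ≤ pvGet (pvAdd st.1 r c (v r c)) r c then st.2 + 1 else st.2))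
        st).1) q = RLen st.1 q) ∧
     (∀ i j, pvGet (((List.range t).foldl (fun st c =>
        (pvAdd st.1 r c (v r c), if 1 ≤ pvGet (pvAdd st.1 r c (v r c)) r c then st.2 + 1 else st.2))
        st).1) i j = pvGet st.1 i j + if i = r ∧ j < t then v i j else 0) ∧
     (((List.range t).foldl (fun st c =>
        (pvAdd st.1 r c (v r c), if 1 ≤ pvGet (pvAdd st.1 r c (v r c)) r c then st.2 + 1 else st.2))
        st).2 = (List.range t).foldl (fun a c => if 1 ≤ pvGet st.1 r c + v r c then a + 1 else a) st.2)) := by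
  induction t with
  | zero =>
    exact ⟨rfl, fun q => rfl, fun i j => by
      rw [List.range_zero, List.foldl_nil, if_neg (show ¬(i = r ∧ j < 0) by omega)]; ring, rfl⟩
  | succ t ih =>
    obtain ⟨L, R, V, S⟩ := ih (by omega)
    have hstep : (List.range (t+1)).foldl (fun st c =>
        (pvAdd st.1 r c (v r c), if 1 ≤ pvGet (pvAdd st.1 r c (v r c)) r c then st.2 + 1 else st.2)) st
      = ((pvAdd ((List.range t).foldl (fun st c =>
          (pvAdd st.1 r c (v r c), if 1 ≤ pvGet (pvAdd st.1 r c (v r c)) r c then st.2 + 1 else st.2)) st).1 r t (v r t)),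
         if 1 ≤ pvGet (pvAdd ((List.range t).foldl (fun st c =>
          (pvAdd st.1 r c (v r c), if 1 ≤ pvGet (pvAdd st.1 r c (v r c)) r c then st.2 + 1 else st.2)) st).1 r t (v r t)) r t
         then ((List.range t).foldl (fun st c =>
          (pvAdd st.1 r c (v r c), if 1 ≤ pvGet (pvAdd st.1 r c (v r c)) r c then st.2 + 1 else st.2)) st).2 + 1
         else ((List.range t).foldl (fun st c =>
          (pvAdd st.1 r c (v r c), if 1 ≤ pvGet (pvAdd st.1 r c (v r c)) r c then st.2 + 1 else st.2)) st).2) := by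
      rw [List.range_succ, List.foldl_append, List.foldl_cons, List.foldl_nil]
    rw [hstep]
    have hget : pvGet (pvAdd ((List.range t).foldl (fun st c =>
        (pvAdd st.1 r c (v r c), if 1 ≤ pvGet (pvAdd st.1 r c (v r c)) r c then st.2 + 1 else st.2)) st).1 r t (v r t)) r t
        = pvGet st.1 r t + v r t := by
      rw [pvGet_pvAdd, L, R r, V r t,
        if_pos (show r = r ∧ t = t ∧ r < st.1.length ∧ t < RLen st.1 r from ⟨rfl, rfl, hr, by omega⟩),
        if_neg (show ¬(r = r ∧ t < t) by omega)]
      ring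
    refine ⟨by simp only []; rw [length_pvAdd, L],
      fun q => by simp only []; rw [RLen_pvAdd, R],
      fun i j => ?_, ?_⟩
    · simp only []
      rw [pvGet_pvAdd, L, R i, V i j]
      by_cases hi : i = r
      · by_cases hj : j = t
        · have hv : v r t = v i j := by rw [hi, hj]
          rw [hv, if_pos (show r = i ∧ t = j ∧ i < st.1.length ∧ j < RLen st.1 i from
              ⟨hi.symm, hj.symm, by omega, by rw [hi]; omega⟩),
            if_neg (show ¬(i = r ∧ j < t) by omega),
            if_pos (show i = r ∧ j < t + 1 by omega)]
          ring
        · rw [if_neg (show ¬(r = i ∧ t = j ∧ i < st.1.length ∧ j < RLen st.1 i) from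
              fun h => hj (h.2.1.symm))]
          by_cases hjt : j < t
          · rw [if_pos (show i = r ∧ j < t from ⟨hi, hjt⟩),
              if_pos (show i = r ∧ j < t + 1 by omega)]
            ring
          · rw [if_neg (show ¬(i = r ∧ j < t) by omega),
              if_neg (show ¬(i = r ∧ j < t + 1) by omega)]
            ring
      · rw [if_neg (show ¬(r = i ∧ t = j ∧ i < st.1.length ∧ j < RLen st.1 i) from
            fun h => hi (h.1.symm)),
          if_neg (show ¬(i = r ∧ j < t) from fun h => hi h.1),
          if_neg (show ¬(i = r ∧ j < t + 1) from fun h => hi h.1)]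
        ring
    · simp only []
      rw [hget, S, List.range_succ, List.foldl_append, List.foldl_cons, List.foldl_nil]

theorem countOuter_spec (b : List (List Int)) (v : Nat → Nat → Int) (m : Nat) (K : Nat) (z : Int)
    (hK : K ≤ b.length) (hm : ∀ q < b.length, m ≤ RLen b q) :
    ((((List.range K).foldl (fun st r => (List.range m).foldl (fun st c =>
        (pvAdd st.1 r c (v r c), if 1 ≤ pvGet (pvAdd st.1 r c (v r c)) r c then st.2 + 1 else st.2)) st)
        (b, z)).1.length = b.length) ∧
     (∀ q, RLen (((List.range K).foldl (fun st r => (List.range m).foldl (fun st c =>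
        (pvAdd st.1 r c (v r c), if 1 ≤ pvGet (pvAdd st.1 r c (v r c)) r c then st.2 + 1 else st.2)) st)
        (b, z)).1) q = RLen b q) ∧
     (∀ i j, pvGet (((List.range K).foldl (fun st r => (List.range m).foldl (fun st c =>
        (pvAdd st.1 r c (v r c), if 1 ≤ pvGet (pvAdd st.1 r c (v r c)) r c then st.2 + 1 else st.2)) st)
        (b, z)).1) i j = pvGet b i j + if i < K ∧ j < m then v i j else 0) ∧
     (((List.range K).foldl (fun st r => (List.range m).foldl (fun st c =>
        (pvAdd st.1 r c (v r c), if 1 ≤ pvGet (pvAdd st.1 r c (v r c)) r c then st.2 + 1 else st.2)) st)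
        (b, z)).2 = (List.range K).foldl (fun a r => (List.range m).foldl (fun a c =>
          if 1 ≤ pvGet b r c + v r c then a + 1 else a) a) z)) := by
  induction K with
  | zero =>
    exact ⟨rfl, fun q => rfl, fun i j => by
      rw [List.range_zero, List.foldl_nil, if_neg (show ¬(i < 0 ∧ j < m) by omega)]; ring, rfl⟩
  | succ K ih =>
    obtain ⟨L, R, V, S⟩ := ih (by omega)
    have hstep : (List.range (K+1)).foldl (fun st r => (List.range m).foldl (fun st c =>
        (pvAdd st.1 r c (v r c), if 1 ≤ pvGet (pvAdd st.1 r c (v r c)) r c then st.2 + 1 else st.2)) st) (b, z)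
      = (List.range m).foldl (fun st c =>
        (pvAdd st.1 K c (v K c), if 1 ≤ pvGet (pvAdd st.1 K c (v K c)) K c then st.2 + 1 else st.2))
        ((List.range K).foldl (fun st r => (List.range m).foldl (fun st c =>
        (pvAdd st.1 r c (v r c), if 1 ≤ pvGet (pvAdd st.1 r c (v r c)) r c then st.2 + 1 else st.2)) st) (b, z)) := by
      rw [List.range_succ, List.foldl_append, List.foldl_cons, List.foldl_nil]
    obtain ⟨L2, R2, V2, S2⟩ := countInner_spec ((List.range K).foldl (fun st r => (List.range m).foldl (fun st c =>
        (pvAdd st.1 r c (v r c), if 1 ≤ pvGet (pvAdd st.1 r c (v r c)) r c then st.2 + 1 else st.2)) st) (b, z))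
      v K m m (by rw [L]; omega) (le_refl m) (by rw [R]; exact hm K (by omega))
    refine ⟨by rw [hstep, L2, L], fun q => by rw [hstep, R2, R], fun i j => ?_, ?_⟩
    · rw [hstep, V2 i j, V i j]
      by_cases hi : i = K
      · by_cases hj : j < m
        · have hv : v i j = v K j := by rw [hi]
          rw [if_neg (show ¬(i < K ∧ j < m) by omega), if_pos (show i = K ∧ j < m from ⟨hi, hj⟩),
            if_pos (show i < K + 1 ∧ j < m by omega), hv]
          ring
        · rw [if_neg (show ¬(i < K ∧ j < m) by omega), if_neg (show ¬(i = K ∧ j < m) by omega),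
            if_neg (show ¬(i < K + 1 ∧ j < m) by omega)]
          ring
      · by_cases hik : i < K ∧ j < m
        · rw [if_pos hik, if_neg (show ¬(i = K ∧ j < m) by omega),
            if_pos (show i < K + 1 ∧ j < m by omega)]
          ring
        · rw [if_neg hik, if_neg (show ¬(i = K ∧ j < m) from fun h => hi h.1),
            if_neg (show ¬(i < K + 1 ∧ j < m) by omega)]
          ring
    · rw [hstep, S2, S, List.range_succ, List.foldl_append, List.foldl_cons, List.foldl_nil]
      apply PySem.List.foldl_congr_mem
      intro acc c hc
      rw [V K c, if_neg (show ¬(K < K ∧ c < m) by omega), add_zero]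

theorem count_congr (n m : Nat) (f g : Nat → Nat → Int) (z : Int)
    (h : ∀ r < n, ∀ c < m, f r c = g r c) :
    (List.range n).foldl (fun a r => (List.range m).foldl (fun a c =>
      if 1 ≤ f r c then a + 1 else a) a) z
    = (List.range n).foldl (fun a r => (List.range m).foldl (fun a c =>
      if 1 ≤ g r c then a + 1 else a) a) z := by
  apply PySem.List.foldl_congr_mem
  intro acc r hr
  apply PySem.List.foldl_congr_mem
  intro acc2 c hc
  rw [h r (List.mem_range.mp hr) c (List.mem_range.mp hc)]

-- ===== VERDICT (by name: the statement is the Claim_ definition above) =====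
theorem solution_spec : Claim_equal_solution := by
  intro board skill hdom hpre
  unfold Spec_solution
  obtain ⟨hne, hrows, hsk⟩ := hpre
  have hn1 : 1 ≤ board.length := List.length_pos_of_ne_nil hne
  simp only [solution, solution_alt]
  set n := board.length with hn_def
  set m := (board.headD []).length with hm_def
  have hmrows : ∀ q < board.length, m ≤ RLen board q := by
    intro q hq
    have hb : board.getD q [] = board[q] := by
      simp [List.getD_eq_getElem?_getD, List.getElem?_eq_getElem hq]
    unfold RLen
    rw [hb]
    exact hrows _ (List.getElem_mem hq)
  have lenD : (skill.foldl (applySkillA n m)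
      ((List.range n).map (fun _ => (List.range m).map (fun _ => (0:Int))))).length = n := by
    rw [skillfoldA_len, map0_len]
  have rlenD : ∀ q, RLen (skill.foldl (applySkillA n m)
      ((List.range n).map (fun _ => (List.range m).map (fun _ => (0:Int))))) q
      = if q < n then m else 0 := by
    intro q
    rw [skillfoldA_RLen, map0_RLen]
  have getD : ∀ r c, pvGet (skill.foldl (applySkillA n m)
      ((List.range n).map (fun _ => (List.range m).map (fun _ => (0:Int))))) r c
      = (skill.map (fun s => deltaS n m s r c)).sum := by
    intro r c
    rw [skillfoldA_get n m skill _ (map0_len n m) (fun q => map0_RLen n m q), map0_get, zero_add]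
  have hmD : ∀ q < (skill.foldl (applySkillA n m)
      ((List.range n).map (fun _ => (List.range m).map (fun _ => (0:Int))))).length,
      m ≤ RLen (skill.foldl (applySkillA n m)
      ((List.range n).map (fun _ => (List.range m).map (fun _ => (0:Int))))) q := by
    intro q hq
    rw [rlenD, if_pos (by rw [lenD] at hq; exact hq)]
  obtain ⟨lenH, rlenH, VH⟩ := houter_spec (skill.foldl (applySkillA n m)
      ((List.range n).map (fun _ => (List.range m).map (fun _ => (0:Int))))) m n
      (le_of_eq lenD.symm) hmD
  have hmH : ∀ q < (hpass n m (skill.foldl (applySkillA n m)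
      ((List.range n).map (fun _ => (List.range m).map (fun _ => (0:Int)))))).length,
      m ≤ RLen (hpass n m (skill.foldl (applySkillA n m)
      ((List.range n).map (fun _ => (List.range m).map (fun _ => (0:Int)))))) q := by
    intro q hq
    unfold hpass at *
    rw [rlenH, rlenD, if_pos (by rw [lenH, lenD] at hq; exact hq)]
  obtain ⟨lenM, rlenM, VM⟩ := vouter_spec (hpass n m (skill.foldl (applySkillA n m)
      ((List.range n).map (fun _ => (List.range m).map (fun _ => (0:Int)))))) m (n-1)
      (by unfold hpass; rw [lenH, lenD]; omega) hmH
  have keyM : ∀ i j, i < n → j < m →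
      pvGet (vpass n m (hpass n m (skill.foldl (applySkillA n m)
        ((List.range n).map (fun _ => (List.range m).map (fun _ => (0:Int))))))) i j
      = (skill.map (fun s => rectS s i j)).sum := by
    intro i j hi hj
    unfold vpass hpass at *
    rw [VM i j hj, if_pos (by omega)]
    rw [Finset.sum_congr rfl (fun r hr => (VH r j).2
      (by have := Finset.mem_range.mp hr; omega) hj)]
    rw [Finset.sum_congr rfl (fun r hr => Finset.sum_congr rfl (fun c hc => getD r c))]
    exact listsum_swap n m skill hsk i j hi hj
  obtain ⟨lenB, rlenB, VB⟩ := skillfoldB_spec n m skill board rfl hmrows hsk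
  have SA := (countOuter_spec board
      (fun r c => pvGet (vpass n m (hpass n m (skill.foldl (applySkillA n m)
        ((List.range n).map (fun _ => (List.range m).map (fun _ => (0:Int))))))) r c)
      m n 0 (le_refl n) hmrows).2.2.2
  simp only [] at SA
  rw [SA]
  have CC := count_congr n m
    (fun r c => pvGet board r c + pvGet (vpass n m (hpass n m (skill.foldl (applySkillA n m)
        ((List.range n).map (fun _ => (List.range m).map (fun _ => (0:Int))))))) r c)
    (fun r c => pvGet (skill.foldl (rectAddB n m) board) r c) 0
    (by
      intro r hr c hc
      simp only []
      rw [keyM r c hr hc, VB r c])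
  simp only [] at CC
  rw [CC]
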